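-- pv_equiv track=rewrite | github.com/AgungImanW/Kriptografi-4611422112-AgungImanWicaksono | main.py | hill_cipher
-- ===== SOURCE A (Python) =====
-- def hill_cipher(text, key, mode):
--     # Convert key to a 2x2 matrix
--     key_matrix = [[ord(key[0]) - 65, ord(key[1]) - 65],
--                   [ord(key[2]) - 65, ord(key[3]) - 65]]
--
--     text = text.upper().replace(" ", "")
--     if len(text) % 2 != 0:
--         text += 'X'  # Padding if odd length
--
--     # Create text matrix
--     text_matrix = []
--     for i in range(0, len(text), 2):
--         text_matrix.append([ord(text[i]) - 65, ord(text[i + 1]) - 65])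
--
--     result_matrix = []
--
--     if mode == 'encrypt':
--         for row in text_matrix:
--             result_row = [
--                 (row[0] * key_matrix[0][0] + row[1] * key_matrix[0][1]) % 26,
--                 (row[0] * key_matrix[1][0] + row[1] * key_matrix[1][1]) % 26
--             ]
--             result_matrix.append(result_row)
--     else:
--         # Inverse of the key matrix for decryption
--         det = (key_matrix[0][0] * key_matrix[1][1] - key_matrix[0][1] * key_matrix[1][0]) % 26
--         det_inv = pow(det, -1, 26)  # Modular inverse of determinant
--
--         # Adjugate matrix
--         key_matrix_inv = [
--             [key_matrix[1][1] * det_inv % 26, -key_matrix[0][1] * det_inv % 26],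
--             [-key_matrix[1][0] * det_inv % 26, key_matrix[0][0] * det_inv % 26]
--         ]
--
--         for row in text_matrix:
--             result_row = [
--                 (row[0] * key_matrix_inv[0][0] + row[1] * key_matrix_inv[0][1]) % 26,
--                 (row[0] * key_matrix_inv[1][0] + row[1] * key_matrix_inv[1][1]) % 26
--             ]
--             result_matrix.append(result_row)
--
--     result = ''.join(chr(num + 65) for row in result_matrix for num in row)
--     return result
-- ===== SOURCE B (Python) =====
-- def hill_cipher(text, key, mode):
--     # Build the key matrix (or its modular inverse), then a full 26x26 digraph
--     # substitution table, and encode the text by table lookup.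
--     k = [ord(ch) - 65 for ch in key[:4]]
--     if mode == 'encrypt':
--         m = k
--     else:
--         det = (k[0] * k[3] - k[1] * k[2]) % 26
--         det_inv = pow(det, -1, 26)
--         m = [k[3] * det_inv % 26, -k[1] * det_inv % 26,
--              -k[2] * det_inv % 26, k[0] * det_inv % 26]
--     table = [[chr((r0 * m[0] + r1 * m[1]) % 26 + 65) + chr((r0 * m[2] + r1 * m[3]) % 26 + 65)
--               for r1 in range(26)]
--              for r0 in range(26)]
--     t = text.upper().replace(" ", "")
--     if len(t) % 2:
--         t += 'X'
--     return ''.join(table[(ord(t[i]) - 65) % 26][(ord(t[i + 1]) - 65) % 26]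
--                    for i in range(0, len(t), 2))
-- ===== Notes on version B (the rewrite author's own statement) =====
-- stated objective: alternative
-- what changed: B precomputes a 26x26 digraph substitution table from the key matrix (or its modular inverse) and encodes the text by table lookup on reduced residues, replacing A's per-digraph matrix arithmetic and intermediate matrix lists; Pre_ excludes keys shorter than 4 characters (IndexError) and decrypt mode with a determinant not coprime to 26 (pow raises ValueError).
import Mathlib
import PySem

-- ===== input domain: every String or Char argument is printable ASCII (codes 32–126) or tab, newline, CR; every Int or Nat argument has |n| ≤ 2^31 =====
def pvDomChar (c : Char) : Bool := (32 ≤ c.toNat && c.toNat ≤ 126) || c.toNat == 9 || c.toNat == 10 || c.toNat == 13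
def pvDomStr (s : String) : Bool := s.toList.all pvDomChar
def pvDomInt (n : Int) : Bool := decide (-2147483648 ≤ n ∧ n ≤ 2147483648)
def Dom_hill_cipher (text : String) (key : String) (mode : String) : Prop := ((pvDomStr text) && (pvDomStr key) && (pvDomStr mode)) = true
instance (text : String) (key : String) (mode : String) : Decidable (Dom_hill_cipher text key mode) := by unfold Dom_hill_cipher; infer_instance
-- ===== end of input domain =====

-- B replaces A's per-digraph matrix arithmetic by a 26×26 digraph substitution table
-- built once from the key matrix (alternative decomposition, same cost on short texts).

-- Hand port of Python's pow(a, -1, 26) (used by both A and B): the unique inverse of a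
-- modulo 26 in [0, 26), none = ValueError.  Exact: pow returns the least nonnegative
-- representative, which is the first (and only) hit of this scan.
def pyInvMod26 (a : Int) : Option Int :=
  (PySem.List.pyRange 0 26 1).find? (fun i => PySem.Int.mod (a * i) 26 == 1)

-- ===== PORT A =====
def hill_cipher (text : String) (key : String) (mode : String) : String :=
  let kl := key.toList
  let k00 : Int := ((PySem.List.pyGetD kl 0 'A').toNat : Int) - 65
  let k01 : Int := ((PySem.List.pyGetD kl 1 'A').toNat : Int) - 65
  let k10 : Int := ((PySem.List.pyGetD kl 2 'A').toNat : Int) - 65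
  let k11 : Int := ((PySem.List.pyGetD kl 3 'A').toNat : Int) - 65
  let t0 := (PySem.Str.replace (PySem.Str.upper text) " " "").toList
  let t := if t0.length % 2 ≠ 0 then t0 ++ ['X'] else t0
  let text_matrix : List (Int × Int) := (PySem.List.pyRange 0 (t.length : Int) 2).foldl
      (fun acc i => acc ++ [(((PySem.List.pyGetD t i 'A').toNat : Int) - 65,
                             ((PySem.List.pyGetD t (i + 1) 'A').toNat : Int) - 65)]) []
  if mode = "encrypt" then
    let result_matrix := text_matrix.foldl (fun acc row =>
        acc ++ [(PySem.Int.mod (row.1 * k00 + row.2 * k01) 26,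
                 PySem.Int.mod (row.1 * k10 + row.2 * k11) 26)]) []
    String.ofList (result_matrix.flatMap (fun r =>
        [Char.ofNat (r.1 + 65).toNat, Char.ofNat (r.2 + 65).toNat]))
  else
    let det := PySem.Int.mod (k00 * k11 - k01 * k10) 26
    match pyInvMod26 det with
    | none => ""     -- pow(det, -1, 26) raises ValueError; excluded by Pre_
    | some det_inv =>
      let i00 := PySem.Int.mod (k11 * det_inv) 26
      let i01 := PySem.Int.mod (-k01 * det_inv) 26
      let i10 := PySem.Int.mod (-k10 * det_inv) 26
      let i11 := PySem.Int.mod (k00 * det_inv) 26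
      let result_matrix := text_matrix.foldl (fun acc row =>
          acc ++ [(PySem.Int.mod (row.1 * i00 + row.2 * i01) 26,
                   PySem.Int.mod (row.1 * i10 + row.2 * i11) 26)]) []
      String.ofList (result_matrix.flatMap (fun r =>
          [Char.ofNat (r.1 + 65).toNat, Char.ofNat (r.2 + 65).toNat]))

-- ===== PORT B =====
def hill_cipher_alt (text : String) (key : String) (mode : String) : String :=
  let k : List Int := (PySem.List.slice key.toList none (some 4)).map
      (fun c => ((c.toNat : Int) - 65))
  let m? : Option (List Int) :=
    if mode = "encrypt" then some k
    else
      let det := PySem.Int.mod (PySem.List.pyGetD k 0 0 * PySem.List.pyGetD k 3 0 -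
                                PySem.List.pyGetD k 1 0 * PySem.List.pyGetD k 2 0) 26
      match pyInvMod26 det with
      | none => none     -- pow(det, -1, 26) raises ValueError; excluded by Pre_
      | some det_inv =>
        some [PySem.Int.mod (PySem.List.pyGetD k 3 0 * det_inv) 26,
              PySem.Int.mod (-PySem.List.pyGetD k 1 0 * det_inv) 26,
              PySem.Int.mod (-PySem.List.pyGetD k 2 0 * det_inv) 26,
              PySem.Int.mod (PySem.List.pyGetD k 0 0 * det_inv) 26]
  match m? with
  | none => ""
  | some m =>
    let table : List (List String) := (PySem.List.pyRange 0 26 1).map (fun r0 =>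
        (PySem.List.pyRange 0 26 1).map (fun r1 =>
          String.ofList
            [Char.ofNat (PySem.Int.mod (r0 * PySem.List.pyGetD m 0 0 + r1 * PySem.List.pyGetD m 1 0) 26 + 65).toNat,
             Char.ofNat (PySem.Int.mod (r0 * PySem.List.pyGetD m 2 0 + r1 * PySem.List.pyGetD m 3 0) 26 + 65).toNat]))
    let t0 := (PySem.Str.replace (PySem.Str.upper text) " " "").toList
    let t := if t0.length % 2 ≠ 0 then t0 ++ ['X'] else t0
    PySem.Str.join "" ((PySem.List.pyRange 0 (t.length : Int) 2).map (fun i =>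
        PySem.List.pyGetD
          (PySem.List.pyGetD table
            (PySem.Int.mod (((PySem.List.pyGetD t i 'A').toNat : Int) - 65) 26) [])
          (PySem.Int.mod (((PySem.List.pyGetD t (i + 1) 'A').toNat : Int) - 65) 26) ""))

-- ===== PRECONDITION & SPEC =====
-- the raw determinant of the key matrix, from the first four key characters
def hillDet (key : String) : Int :=
  let kl := key.toList
  (((kl.getD 0 'A').toNat : Int) - 65) * (((kl.getD 3 'A').toNat : Int) - 65) -
  (((kl.getD 1 'A').toNat : Int) - 65) * (((kl.getD 2 'A').toNat : Int) - 65)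

-- Pre_ excludes exactly the inputs where the Python A raises: a key with fewer than
-- 4 characters (IndexError), and decrypt mode with a determinant not coprime to 26
-- (pow(det, -1, 26) raises ValueError).
def Pre_hill_cipher (text : String) (key : String) (mode : String) : Prop :=
  4 ≤ key.toList.length ∧ (mode = "encrypt" ∨ Int.gcd (hillDet key) 26 = 1)
instance (text : String) (key : String) (mode : String) : Decidable (Pre_hill_cipher text key mode) := by
  unfold Pre_hill_cipher; infer_instance

def pvWitness_hill_cipher : String × String × String := ("HELLO WORLD", "HILL", "encrypt")

def Spec_hill_cipher (text : String) (key : String) (mode : String) (out : String) : Prop := out = hill_cipher_alt text key mode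
instance (text : String) (key : String) (mode : String) (out : String) : Decidable (Spec_hill_cipher text key mode out) := by unfold Spec_hill_cipher; infer_instance

-- ===== CLAIM (what is proved, stated in full; the proofs are below) =====
def Claim_equal_hill_cipher : Prop := ∀ (text : String) (key : String) (mode : String), Dom_hill_cipher text key mode → Pre_hill_cipher text key mode → Spec_hill_cipher text key mode (hill_cipher text key mode)

-- ===== LEMMAS AND PROOFS =====

theorem join_nil_flatten (l : List (List Char)) : PySem.Chars.join [] l = l.flatten := by
  induction l with
  | nil => rfl
  | cons h t ih =>
    cases t with
    | nil => simp [PySem.Chars.join, List.intercalate]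
    | cons h2 t2 =>
      simp only [PySem.Chars.join, List.intercalate, List.intersperse, List.flatten_cons] at *
      simpa using ih

theorem pyGetD_c0 {α : Type} (x0 x1 x2 x3 : α) (r : List α) (d0 : α) :
    PySem.List.pyGetD (x0 :: x1 :: x2 :: x3 :: r) 0 d0 = x0 := by
  have h : ((0:Int) ≤ ↑r.length + 1 + 1 + 1) := by omega
  simp [PySem.List.pyGetD, PySem.List.pyGet?, PySem.List.pyIdx?, h]

theorem pyGetD_c1 {α : Type} (x0 x1 x2 x3 : α) (r : List α) (d0 : α) :
    PySem.List.pyGetD (x0 :: x1 :: x2 :: x3 :: r) 1 d0 = x1 := by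
  have h : ((0:Int) ≤ ↑r.length + 1 + 1) := by omega
  simp [PySem.List.pyGetD, PySem.List.pyGet?, PySem.List.pyIdx?, h]

theorem pyGetD_c2 {α : Type} (x0 x1 x2 x3 : α) (r : List α) (d0 : α) :
    PySem.List.pyGetD (x0 :: x1 :: x2 :: x3 :: r) 2 d0 = x2 := by
  have h : ((2:Int) ≤ ↑r.length + 1 + 1 + 1) := by omega
  simp [PySem.List.pyGetD, PySem.List.pyGet?, PySem.List.pyIdx?, h]

theorem pyGetD_c3 {α : Type} (x0 x1 x2 x3 : α) (r : List α) (d0 : α) :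
    PySem.List.pyGetD (x0 :: x1 :: x2 :: x3 :: r) 3 d0 = x3 := by
  have h : ((3:Int) ≤ ↑r.length + 1 + 1 + 1) := by omega
  simp [PySem.List.pyGetD, PySem.List.pyGet?, PySem.List.pyIdx?, h]

-- joining 2-char strings with "" is flattening the character lists
theorem join_ofList {α : Type} (l : List α) (f : α → List Char) :
    PySem.Str.join "" (l.map (fun x => String.ofList (f x))) = String.ofList (l.flatMap f) := by
  simp [PySem.Str.join, join_nil_flatten, List.map_map, Function.comp_def, List.flatMap_def]

-- reducing the residues mod 26 before the linear form does not change it mod 26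
theorem mod_lin (a b m m' : Int) :
    PySem.Int.mod (PySem.Int.mod a 26 * m + PySem.Int.mod b 26 * m') 26 =
    PySem.Int.mod (a * m + b * m') 26 := by
  simp only [PySem.Int.mod_eq_emod_of_pos (by norm_num : (0:Int) < 26)]
  conv_rhs => rw [Int.add_emod, Int.mul_emod a, Int.mul_emod b]
  conv_lhs => rw [Int.add_emod, Int.mul_emod (a % 26), Int.mul_emod (b % 26)]
  simp [Int.emod_emod_of_dvd]

-- the table lookup at the reduced residues is the per-digraph arithmetic
theorem table_lookup (m0 m1 m2 m3 a b : Int) :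
    PySem.List.pyGetD
      (PySem.List.pyGetD
        ((PySem.List.pyRange 0 26 1).map (fun r0 =>
          (PySem.List.pyRange 0 26 1).map (fun r1 =>
            String.ofList
              [Char.ofNat (PySem.Int.mod (r0 * m0 + r1 * m1) 26 + 65).toNat,
               Char.ofNat (PySem.Int.mod (r0 * m2 + r1 * m3) 26 + 65).toNat])))
        (PySem.Int.mod a 26) [])
      (PySem.Int.mod b 26) ""
    = String.ofList
        [Char.ofNat (PySem.Int.mod (a * m0 + b * m1) 26 + 65).toNat,
         Char.ofNat (PySem.Int.mod (a * m2 + b * m3) 26 + 65).toNat] := by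
  have h26 : (0:Int) < 26 := by norm_num
  have ha0 : 0 ≤ PySem.Int.mod a 26 := by
    rw [PySem.Int.mod_eq_emod_of_pos h26]; exact Int.emod_nonneg a (by norm_num)
  have ha1 : PySem.Int.mod a 26 < 26 := by
    rw [PySem.Int.mod_eq_emod_of_pos h26]; exact Int.emod_lt_of_pos a h26
  have hb0 : 0 ≤ PySem.Int.mod b 26 := by
    rw [PySem.Int.mod_eq_emod_of_pos h26]; exact Int.emod_nonneg b (by norm_num)
  have hb1 : PySem.Int.mod b 26 < 26 := by
    rw [PySem.Int.mod_eq_emod_of_pos h26]; exact Int.emod_lt_of_pos b h26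
  rw [PySem.List.pyGetD_map_pyRange_of_nonneg _ 26 _ _ ha0 ha1,
      PySem.List.pyGetD_map_pyRange_of_nonneg _ 26 _ _ hb0 hb1,
      mod_lin, mod_lin]

-- the shared core: A's two foldl passes and join equal B's table-lookup pass,
-- for ANY processed text t and matrix entries m0..m3
theorem hill_core (t : List Char) (m0 m1 m2 m3 : Int) :
    String.ofList ((((PySem.List.pyRange 0 (t.length : Int) 2).foldl
        (fun acc i => acc ++ [(((PySem.List.pyGetD t i 'A').toNat : Int) - 65,
                               ((PySem.List.pyGetD t (i + 1) 'A').toNat : Int) - 65)]) []).foldl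
        (fun acc row => acc ++ [(PySem.Int.mod (row.1 * m0 + row.2 * m1) 26,
                                 PySem.Int.mod (row.1 * m2 + row.2 * m3) 26)]) []).flatMap
        (fun r => [Char.ofNat (r.1 + 65).toNat, Char.ofNat (r.2 + 65).toNat]))
    = PySem.Str.join "" ((PySem.List.pyRange 0 (t.length : Int) 2).map (fun i =>
        PySem.List.pyGetD
          (PySem.List.pyGetD
            ((PySem.List.pyRange 0 26 1).map (fun r0 =>
              (PySem.List.pyRange 0 26 1).map (fun r1 =>
                String.ofList
                  [Char.ofNat (PySem.Int.mod (r0 * m0 + r1 * m1) 26 + 65).toNat,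
                   Char.ofNat (PySem.Int.mod (r0 * m2 + r1 * m3) 26 + 65).toNat])))
            (PySem.Int.mod (((PySem.List.pyGetD t i 'A').toNat : Int) - 65) 26) [])
          (PySem.Int.mod (((PySem.List.pyGetD t (i + 1) 'A').toNat : Int) - 65) 26) "")) := by
  simp only [table_lookup]
  rw [join_ofList]
  simp only [PySem.List.foldl_append_singleton_eq_map, List.nil_append, List.map_map,
    List.flatMap_map, Function.comp_def]

-- gcd(det, 26) = 1 means the scan in pyInvMod26 finds an inverse
theorem invMod26_isSome (a : Int) (h : Int.gcd a 26 = 1) :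
    pyInvMod26 (PySem.Int.mod a 26) ≠ none := by
  have hco : IsCoprime a 26 := Int.isCoprime_iff_gcd_eq_one.mpr h
  obtain ⟨u, v, huv⟩ := hco
  intro hnone
  have hmem : u % 26 ∈ PySem.List.pyRange 0 26 1 := by
    rw [PySem.List.mem_pyRange_one]
    exact ⟨Int.emod_nonneg u (by norm_num), Int.emod_lt_of_pos u (by norm_num)⟩
  have hall := List.find?_eq_none.mp hnone (u % 26) hmem
  apply hall
  have h26 : (0:Int) < 26 := by norm_num
  have key : PySem.Int.mod (PySem.Int.mod a 26 * (u % 26)) 26 = 1 := by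
    rw [PySem.Int.mod_eq_emod_of_pos h26, PySem.Int.mod_eq_emod_of_pos h26]
    have h1 : a % 26 * (u % 26) % 26 = a * u % 26 := (Int.mul_emod a u 26).symm
    rw [h1]
    have h2 : a * u = 1 - v * 26 := by linarith
    rw [h2]
    omega
  rw [beq_iff_eq]
  exact key

-- ===== VERDICT (by name: the statement is the Claim_ definition above) =====
theorem hill_cipher_spec : Claim_equal_hill_cipher := by
  intro text key mode _hdom hpre
  obtain ⟨hlen, hmode⟩ := hpre
  unfold Spec_hill_cipher hill_cipher hill_cipher_alt
  rcases hkl : key.toList with _ | ⟨a, _ | ⟨b, _ | ⟨c, _ | ⟨d, rest⟩⟩⟩⟩ <;>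
    rw [hkl] at hlen <;> simp at hlen
  have hdet : hillDet key = ((a.toNat : Int) - 65) * ((d.toNat : Int) - 65) -
      ((b.toNat : Int) - 65) * ((c.toNat : Int) - 65) := by
    simp [hillDet, hkl]
  have hslice : PySem.List.slice (a :: b :: c :: d :: rest) none (some 4) = [a, b, c, d] := by
    rw [PySem.List.slice_to _ (by norm_num : (0:Int) ≤ 4)]
    simp
  simp only [hslice, List.map_cons, List.map_nil, pyGetD_c0, pyGetD_c1, pyGetD_c2, pyGetD_c3]
  by_cases hm : mode = "encrypt"
  · simp only [hm, reduceIte]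
    exact hill_core _ _ _ _ _
  · simp only [if_neg hm]
    rcases hinv : pyInvMod26 (PySem.Int.mod (((a.toNat : Int) - 65) * ((d.toNat : Int) - 65) -
        ((b.toNat : Int) - 65) * ((c.toNat : Int) - 65)) 26) with _ | det_inv
    · exact absurd hinv (invMod26_isSome _ (hdet ▸ hmode.resolve_left hm))
    · simp only [pyGetD_c0, pyGetD_c1, pyGetD_c2, pyGetD_c3]
      exact hill_core _ _ _ _ _
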